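-- pv_equiv track=rewrite | github.com/mattiasgronlund/drawio-rs | bin/edge_style_path_report.py | per_key_variations
-- ===== SOURCE A (Python) =====
-- from collections import defaultdict
--
-- def per_key_variations(rows: list[dict[str, str]], columns: list[str]) -> dict[str, list[str]]:
--     by_key: dict[str, list[dict[str, str]]] = defaultdict(list)
--     for row in rows:
--         by_key[row.get("key", "")].append(row)
--     summary: dict[str, list[str]] = {}
--     for key, key_rows in by_key.items():
--         varying: list[str] = []
--         for col in columns:
--             values = {row.get(col, "") for row in key_rows}
--             if len(values) > 1:
--                 varying.append(col)
--         summary[key] = varying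
--     return summary
-- ===== SOURCE B (Python) =====
-- def per_key_variations(rows: list[dict[str, str]], columns: list[str]) -> dict[str, list[str]]:
--     # Single pass over rows: remember each (key, col)'s first value and mark
--     # (key, col) as varying as soon as a later value differs.
--     order: list[str] = []
--     first: dict[tuple[str, str], str] = {}
--     varying: set[tuple[str, str]] = set()
--     for row in rows:
--         k = row.get("key", "")
--         if k not in order:
--             order.append(k)
--         for col in columns:
--             v = row.get(col, "")
--             if (k, col) not in first:
--                 first[(k, col)] = v
--             elif v != first[(k, col)]:
--                 varying.add((k, col))
--     return {k: [c for c in columns if (k, c) in varying] for k in order}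
-- ===== Notes on version B (the rewrite author's own statement) =====
-- stated objective: alternative
-- what changed: Replaced A's group-then-rescan design (bucket all rows per key, then per key/column build a set of values and test its size) by a single pass over the rows that records each (key,col)'s first value and marks (key,col) varying on the first later mismatch, assembling the result from the key first-appearance order at the end.
import Mathlib
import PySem

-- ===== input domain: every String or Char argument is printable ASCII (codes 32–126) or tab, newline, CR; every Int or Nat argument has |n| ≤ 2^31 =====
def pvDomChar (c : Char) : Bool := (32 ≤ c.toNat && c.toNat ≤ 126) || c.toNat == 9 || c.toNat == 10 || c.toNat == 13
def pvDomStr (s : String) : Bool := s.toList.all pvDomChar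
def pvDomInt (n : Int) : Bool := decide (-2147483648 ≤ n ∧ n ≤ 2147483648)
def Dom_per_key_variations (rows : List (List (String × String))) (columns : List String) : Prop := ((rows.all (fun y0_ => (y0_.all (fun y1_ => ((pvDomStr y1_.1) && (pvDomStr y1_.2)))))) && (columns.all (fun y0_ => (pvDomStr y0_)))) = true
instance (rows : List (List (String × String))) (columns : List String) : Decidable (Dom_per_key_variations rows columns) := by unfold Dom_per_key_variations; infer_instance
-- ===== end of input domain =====

-- B replaces A's group-then-rescan (bucket rows per key, then test per-column value-set sizes)
-- by a single pass recording each (key,col)'s first value and marking later mismatches (alternative decomposition, similar cost).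

-- row.get(col, "") — rows are Python dicts, read through PySem.Dict (shared accessor of both ports)
def pvGet (row : List (String × String)) (c : String) : String :=
  (PySem.Dict.ofList row).getD c ""

-- ===== PORT A =====
def per_key_variations (rows : List (List (String × String))) (columns : List String) : List (String × List String) :=
  let by_key : PySem.Dict String (List (List (String × String))) :=
    rows.foldl (fun d row => d.modify (pvGet row "key") [] (fun l => l ++ [row])) PySem.Dict.empty
  let summary : PySem.Dict String (List String) :=
    by_key.items.foldl (fun s kv =>
      s.insert kv.1 (columns.foldl (fun varying col =>
        if 1 < (PySem.Set.ofList (kv.2.map (fun row => pvGet row col))).length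
        then varying ++ [col] else varying) [])) PySem.Dict.empty
  summary.items

-- ===== PORT B =====
-- inner `for col in columns` loop of B, threading (first, varying)
def pvBInner (k : String) (row : List (String × String)) (columns : List String)
    (fv : PySem.Dict (String × String) String × PySem.Set (String × String)) :
    PySem.Dict (String × String) String × PySem.Set (String × String) :=
  columns.foldl (fun fv col =>
    let v := pvGet row col
    match fv.1.get? (k, col) with
    | none => (fv.1.insert (k, col) v, fv.2)
    | some w => if v = w then fv else (fv.1, PySem.Set.add fv.2 (k, col))) fv

def per_key_variations_alt (rows : List (List (String × String))) (columns : List String) : List (String × List String) :=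
  let st :=
    rows.foldl (fun st row =>
      let k := pvGet row "key"
      let order := if st.1.contains k then st.1 else st.1 ++ [k]
      let fv := pvBInner k row columns (st.2.1, st.2.2)
      (order, fv.1, fv.2))
      (([] : List String), (PySem.Dict.empty : PySem.Dict (String × String) String),
        (PySem.Set.empty : PySem.Set (String × String)))
  (st.1.foldl (fun d k =>
      d.insert k (columns.filter (fun c => PySem.Set.contains st.2.2 (k, c)))) PySem.Dict.empty).items

-- ===== PRECONDITION & SPEC =====
def Spec_per_key_variations (rows : List (List (String × String))) (columns : List String) (out : List (String × List String)) : Prop := out = per_key_variations_alt rows columns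
instance (rows : List (List (String × String))) (columns : List String) (out : List (String × List String)) : Decidable (Spec_per_key_variations rows columns out) := by unfold Spec_per_key_variations; infer_instance

-- ===== CLAIM (what is proved, stated in full; the proofs are below) =====
def Claim_equal_per_key_variations : Prop := ∀ (rows : List (List (String × String))) (columns : List String), Dom_per_key_variations rows columns → Spec_per_key_variations rows columns (per_key_variations rows columns)

-- ===== LEMMAS AND PROOFS =====

-- rows with a given key, in order (A's by_key bucket / B's comparison group)
def pvGrp (rows : List (List (String × String))) (k : String) : List (List (String × String)) :=
  rows.filter (fun r => pvGet r "key" == k)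

-- value of column c in the first row of key k's group
def pvFirst (rows : List (List (String × String))) (k c : String) : Option String :=
  (pvGrp rows k).head?.map (fun r => pvGet r c)

-- the outer per-row step of port B, named for the induction
def pvBStep (columns : List String)
    (st : List String × PySem.Dict (String × String) String × PySem.Set (String × String))
    (row : List (String × String)) :
    List String × PySem.Dict (String × String) String × PySem.Set (String × String) :=
  let k := pvGet row "key"
  let order := if st.1.contains k then st.1 else st.1 ++ [k]
  let fv := pvBInner k row columns (st.2.1, st.2.2)
  (order, fv.1, fv.2)

def pvBSt (rows : List (List (String × String))) (columns : List String) :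
    List String × PySem.Dict (String × String) String × PySem.Set (String × String) :=
  rows.foldl (pvBStep columns)
    (([] : List String), (PySem.Dict.empty : PySem.Dict (String × String) String),
      (PySem.Set.empty : PySem.Set (String × String)))

lemma pvAlt_eq (rows : List (List (String × String))) (columns : List String) :
    per_key_variations_alt rows columns =
      ((pvBSt rows columns).1.foldl (fun d k =>
        d.insert k (columns.filter (fun c => PySem.Set.contains (pvBSt rows columns).2.2 (k, c))))
        PySem.Dict.empty).items := rfl

lemma pvBSt_append (rows : List (List (String × String))) (row : List (String × String))
    (columns : List String) :
    pvBSt (rows ++ [row]) columns = pvBStep columns (pvBSt rows columns) row := by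
  simp [pvBSt, List.foldl_append]

lemma pvBInner_nil (k : String) (row : List (String × String))
    (fv : PySem.Dict (String × String) String × PySem.Set (String × String)) :
    pvBInner k row [] fv = fv := rfl

lemma pvBInner_cons (k : String) (row : List (String × String)) (c : String) (cs : List String)
    (fv : PySem.Dict (String × String) String × PySem.Set (String × String)) :
    pvBInner k row (c :: cs) fv =
      pvBInner k row cs
        (match fv.1.get? (k, c) with
          | none => (fv.1.insert (k, c) (pvGet row c), fv.2)
          | some w => if pvGet row c = w then fv else (fv.1, PySem.Set.add fv.2 (k, c))) := rfl

-- the `first` dict after B's inner column loop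
lemma pvBInner_fst (k : String) (row : List (String × String)) (cs : List String) :
    ∀ (f0 : PySem.Dict (String × String) String) (v0 : PySem.Set (String × String))
      (q : String × String),
      (pvBInner k row cs (f0, v0)).1.get? q =
        if q.1 = k ∧ q.2 ∈ cs ∧ f0.get? q = none then some (pvGet row q.2) else f0.get? q := by
  induction cs with
  | nil => intro f0 v0 q; simp [pvBInner_nil]
  | cons c cs ih =>
    intro f0 v0 q
    rw [pvBInner_cons]
    rcases h0 : f0.get? (k, c) with _ | w
    · simp only [h0]
      rw [ih]
      rcases q with ⟨q1, q2⟩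
      simp only [PySem.Dict.get?_insert, List.mem_cons]
      by_cases h1 : q1 = k <;> by_cases h2 : q2 = c <;>
        simp [Prod.ext_iff, h1, h2, h0]
    · simp only [h0]
      by_cases hv : pvGet row c = w
      · simp only [hv]
        rw [ih]
        rcases q with ⟨q1, q2⟩
        by_cases h1 : q1 = k <;> by_cases h2 : q2 = c <;> simp [h1, h2, h0]
      · simp only [if_neg hv]
        rw [ih]
        rcases q with ⟨q1, q2⟩
        by_cases h1 : q1 = k <;> by_cases h2 : q2 = c <;> simp [h1, h2, h0]

-- membership in the `varying` set after B's inner column loop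
lemma pvBInner_snd (k : String) (row : List (String × String)) (cs : List String) :
    ∀ (f0 : PySem.Dict (String × String) String) (v0 : PySem.Set (String × String))
      (q : String × String),
      q ∈ (pvBInner k row cs (f0, v0)).2 ↔
        q ∈ v0 ∨ (q.1 = k ∧ q.2 ∈ cs ∧ ∃ w, f0.get? q = some w ∧ pvGet row q.2 ≠ w) := by
  induction cs with
  | nil => intro f0 v0 q; simp [pvBInner_nil]
  | cons c cs ih =>
    intro f0 v0 q
    rw [pvBInner_cons]
    rcases h0 : f0.get? (k, c) with _ | w
    · simp only [h0]
      rw [ih]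
      rcases q with ⟨q1, q2⟩
      simp only [PySem.Dict.get?_insert, List.mem_cons]
      by_cases h1 : q1 = k <;> by_cases h2 : q2 = c <;>
        simp [Prod.ext_iff, h1, h2, h0]
    · simp only [h0]
      by_cases hv : pvGet row c = w
      · simp only [hv]
        rw [ih]
        rcases q with ⟨q1, q2⟩
        by_cases h1 : q1 = k <;> by_cases h2 : q2 = c <;> simp [h1, h2, h0, hv]
      · simp only [if_neg hv]
        rw [ih]
        rcases q with ⟨q1, q2⟩
        simp only [PySem.Set.mem_add, List.mem_cons]
        by_cases h1 : q1 = k <;> by_cases h2 : q2 = c <;>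
          simp [Prod.ext_iff, h1, h2, h0, hv]

lemma pvGrp_append (rows : List (List (String × String))) (row : List (String × String))
    (k : String) :
    pvGrp (rows ++ [row]) k =
      pvGrp rows k ++ if pvGet row "key" == k then [row] else [] := by
  simp only [pvGrp, List.filter_append, List.filter_cons, List.filter_nil]

-- B invariant: the traversal order is the keys in first-appearance order
lemma pvBSt_order (rows : List (List (String × String))) (columns : List String) :
    (pvBSt rows columns).1 = PySem.Set.ofList (rows.map (fun r => pvGet r "key")) := by
  induction rows using List.reverseRecOn with
  | nil => simp [pvBSt, PySem.Set.ofList_nil]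
  | append_singleton rows row ih =>
    rw [pvBSt_append]
    simp only [pvBStep, List.map_append, List.map_cons, List.map_nil,
      PySem.Set.ofList_append_singleton]
    rw [ih, PySem.Set.add_eq_ite]
    by_cases h : pvGet row "key" ∈ PySem.Set.ofList (rows.map (fun r => pvGet r "key")) <;>
      simp [h]

-- B invariant: `first` holds, per tracked column, the value in the key's first row
lemma pvBSt_first (rows : List (List (String × String))) (columns : List String) :
    ∀ q : String × String,
      (pvBSt rows columns).2.1.get? q =
        if q.2 ∈ columns then pvFirst rows q.1 q.2 else none := by
  induction rows using List.reverseRecOn with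
  | nil =>
    intro q
    simp [pvBSt, pvFirst, pvGrp, PySem.Dict.get?_empty]
  | append_singleton rows row ih =>
    intro q
    rw [pvBSt_append]
    simp only [pvBStep]
    rw [pvBInner_fst, ih q]
    simp only [pvFirst, pvGrp_append]
    by_cases hc : q.2 ∈ columns
    · by_cases h1 : q.1 = pvGet row "key"
      · rw [← h1]
        rcases hg : pvGrp rows q.1 with _ | ⟨r0, t⟩ <;> simp [hc, hg]
      · have hb : (pvGet row "key" == q.1) = false := by
          simp only [beq_eq_false_iff_ne, ne_eq]; exact fun h => h1 h.symm
        simp [hc, h1, hb]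
    · simp [hc]

-- B invariant: (k, c) is in `varying` iff some row of k's group differs from the first row at c
lemma pvBSt_varying (rows : List (List (String × String))) (columns : List String) :
    ∀ q : String × String,
      q ∈ (pvBSt rows columns).2.2 ↔
        q.2 ∈ columns ∧ ∃ r ∈ pvGrp rows q.1, some (pvGet r q.2) ≠ pvFirst rows q.1 q.2 := by
  induction rows using List.reverseRecOn with
  | nil =>
    intro q
    simp [pvBSt, pvGrp, PySem.Set.empty]
  | append_singleton rows row ih =>
    intro q
    rw [pvBSt_append]
    simp only [pvBStep]
    rw [pvBInner_snd, ih q]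
    simp only [pvBSt_first rows columns q, pvFirst, pvGrp_append]
    by_cases hc : q.2 ∈ columns
    · by_cases h1 : q.1 = pvGet row "key"
      · rw [← h1]
        rcases hg : pvGrp rows q.1 with _ | ⟨r0, t⟩
        · simp [hc, hg]
        · simp only [hc, beq_self_eq_true, true_and, if_pos,
            List.head?_cons, Option.map_some, List.mem_append, List.mem_cons,
            List.not_mem_nil, or_false, Option.some.injEq, ne_eq]
          simp only [List.cons_append, List.head?_cons, Option.map_some, Option.some.injEq]
          constructor
          · rintro (⟨r, hr, hne⟩ | ⟨w, hw, hne⟩)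
            · exact ⟨r, Or.inl hr, hne⟩
            · exact ⟨row, Or.inr rfl, by rw [hw]; exact hne⟩
          · rintro ⟨r, hr | hr, hne⟩
            · exact Or.inl ⟨r, hr, hne⟩
            · subst hr
              exact Or.inr ⟨pvGet r0 q.2, rfl, hne⟩
      · have hb : (pvGet row "key" == q.1) = false := by
          simp only [beq_eq_false_iff_ne, ne_eq]; exact fun h => h1 h.symm
        simp [hc, h1, hb]
    · simp [hc]

-- cardinality test via the first element: |{f r : r ∈ x::t}| > 1 iff some r differs from x
lemma pvCard_iff (x : List (String × String)) (t : List (List (String × String)))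
    (f : List (String × String) → String) :
    1 < (PySem.Set.ofList ((x :: t).map f)).length ↔ ∃ r ∈ x :: t, f r ≠ f x := by
  rw [List.map_cons, PySem.Set.ofList_cons]
  simp only [List.length_cons]
  constructor
  · intro h
    have hpos : 0 < ((PySem.Set.ofList (t.map f)).discard (f x)).length := by omega
    obtain ⟨y, hy⟩ := List.exists_mem_of_length_pos hpos
    rw [PySem.Set.mem_discard] at hy
    obtain ⟨hy1, hy2⟩ := hy
    rw [PySem.Set.mem_ofList, List.mem_map] at hy1
    obtain ⟨r, hr, rfl⟩ := hy1
    exact ⟨r, List.mem_cons_of_mem _ hr, hy2⟩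
  · rintro ⟨r, hr, hne⟩
    rcases List.mem_cons.mp hr with rfl | hr
    · exact absurd rfl hne
    · have : f r ∈ (PySem.Set.ofList (t.map f)).discard (f x) := by
        rw [PySem.Set.mem_discard, PySem.Set.mem_ofList]
        exact ⟨List.mem_map_of_mem hr, hne⟩
      have := List.length_pos_of_mem this
      omega

-- port A computes: keys in first-appearance order, each with the columns whose value set is large
lemma pvA_eq (rows : List (List (String × String))) (columns : List String) :
    per_key_variations rows columns =
      (PySem.Set.ofList (rows.map (fun r => pvGet r "key"))).map (fun k =>
        (k, columns.filter (fun c =>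
          decide (1 < (PySem.Set.ofList ((pvGrp rows k).map (fun r => pvGet r c))).length)))) := by
  simp only [per_key_variations]
  have hkeys : (rows.foldl (fun d row => d.modify (pvGet row "key") [] (fun l => l ++ [row]))
      PySem.Dict.empty).keys = PySem.Set.ofList (rows.map (fun r => pvGet r "key")) := by
    rw [PySem.Dict.keys_foldl_modify_key rows (fun r => pvGet r "key") []
      (fun _ row => fun l => l ++ [row]) PySem.Dict.empty]
    rw [PySem.Dict.keys_empty, PySem.Set.ofList_eq_foldl]
    rfl
  have hnodup : (rows.foldl (fun d row => d.modify (pvGet row "key") [] (fun l => l ++ [row]))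
      PySem.Dict.empty).keys.Nodup := by
    rw [hkeys]; exact PySem.Set.nodup_ofList _
  have hgetD : ∀ k, (rows.foldl (fun d row => d.modify (pvGet row "key") [] (fun l => l ++ [row]))
      PySem.Dict.empty).getD k [] = pvGrp rows k := by
    intro k
    have h := PySem.Dict.getD_foldl_modify_append
      (rows.map (fun r => ((pvGet r "key", r) : String × List (String × String))))
      PySem.Dict.empty k
    rw [List.foldl_map] at h
    simp only [List.filter_map, List.map_map] at h
    simpa [pvGrp, Function.comp_def, PySem.Dict.getD_empty] using h
  have hitems : (rows.foldl (fun d row => d.modify (pvGet row "key") [] (fun l => l ++ [row]))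
      PySem.Dict.empty).items =
      (PySem.Set.ofList (rows.map (fun r => pvGet r "key"))).map (fun k => (k, pvGrp rows k)) := by
    rw [PySem.Dict.items_eq_map_keys _ hnodup []]
    rw [hkeys]
    exact List.map_congr_left (fun k _ => by rw [hgetD])
  have hkn : ((rows.foldl (fun d row => d.modify (pvGet row "key") [] (fun l => l ++ [row]))
      PySem.Dict.empty).items.map (fun kv => kv.1)).Nodup := hnodup
  have hfresh := PySem.Dict.items_foldl_insert_fresh
    (l := (rows.foldl (fun d row => d.modify (pvGet row "key") [] (fun l => l ++ [row]))
      PySem.Dict.empty).items)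
    (k := fun kv => kv.1)
    (v := fun kv => columns.foldl (fun varying col =>
      if 1 < (PySem.Set.ofList (kv.2.map (fun row => pvGet row col))).length
      then varying ++ [col] else varying) [])
    (d := PySem.Dict.empty)
    (fun a _ => PySem.Dict.contains_empty a.1) hkn
  simp only [hfresh]
  rw [hitems]
  have hie : (PySem.Dict.empty : PySem.Dict String (List String)).items = [] := rfl
  simp only [hie, List.nil_append, List.map_map]
  refine List.map_congr_left (fun k _ => ?_)
  simp only [Function.comp_apply]
  congr 1
  have hfun : (fun (varying : List String) col =>
      if 1 < (PySem.Set.ofList ((pvGrp rows k).map (fun r => pvGet r col))).length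
      then varying ++ [col] else varying) =
      (fun (acc : List String) x =>
        if (fun c => decide (1 < (PySem.Set.ofList ((pvGrp rows k).map
            (fun r => pvGet r c))).length)) x = true then acc ++ [id x] else acc) := by
    funext acc x
    simp
  rw [hfun, PySem.List.foldl_append_if]
  simp

-- port B computes: same key order, each with the columns marked varying
lemma pvB_eq (rows : List (List (String × String))) (columns : List String) :
    per_key_variations_alt rows columns =
      (PySem.Set.ofList (rows.map (fun r => pvGet r "key"))).map (fun k =>
        (k, columns.filter (fun c => PySem.Set.contains (pvBSt rows columns).2.2 (k, c)))) := by
  rw [pvAlt_eq]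
  have hkn : ((pvBSt rows columns).1.map (fun k => k)).Nodup := by
    rw [List.map_id', pvBSt_order]; exact PySem.Set.nodup_ofList _
  have hfresh := PySem.Dict.items_foldl_insert_fresh
    (l := (pvBSt rows columns).1)
    (k := fun k => (k : String))
    (v := fun k => columns.filter (fun c => PySem.Set.contains (pvBSt rows columns).2.2 (k, c)))
    (d := PySem.Dict.empty)
    (fun a _ => PySem.Dict.contains_empty a) hkn
  simp only [hfresh]
  have hie : (PySem.Dict.empty : PySem.Dict String (List String)).items = [] := rfl
  simp only [hie, List.nil_append]
  rw [pvBSt_order]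

-- ===== VERDICT (by name: the statement is the Claim_ definition above) =====
theorem per_key_variations_spec : Claim_equal_per_key_variations := by
  intro rows columns _
  unfold Spec_per_key_variations
  rw [pvA_eq, pvB_eq]
  refine List.map_congr_left (fun k hk => ?_)
  congr 1
  refine List.filter_congr (fun c hc => ?_)
  rw [Bool.eq_iff_iff]
  simp only [decide_eq_true_eq, PySem.Set.contains_iff, pvBSt_varying rows columns (k, c)]
  have hk' : ∃ r ∈ rows, pvGet r "key" = k := by
    rw [PySem.Set.mem_ofList, List.mem_map] at hk
    obtain ⟨r, hr, rfl⟩ := hk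
    exact ⟨r, hr, rfl⟩
  obtain ⟨r, hr, hrk⟩ := hk'
  have hrg : r ∈ pvGrp rows k := by
    simp [pvGrp, List.mem_filter, hr, hrk]
  rcases hg : pvGrp rows k with _ | ⟨x, t⟩
  · rw [hg] at hrg; simp at hrg
  · rw [pvCard_iff]
    simp only [pvFirst, hg, List.head?_cons, Option.map_some, hc, true_and]
    constructor
    · rintro ⟨r', hr', hne⟩; exact ⟨r', hr', by simpa using hne⟩
    · rintro ⟨r', hr', hne⟩; exact ⟨r', hr', by simpa using hne⟩
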